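-- pv_equiv track=rewrite | github.com/miladbarooni/DigiKalaScraper | make_csv.py | number_of_cores
-- ===== SOURCE A (Python) =====
-- def number_of_cores(entry):
--
--     sum = 0
--
--     last_char = ' '
--     for char in entry:
--         if char in 'xX' and last_char.isdigit():
--             sum += int(last_char)
--         if char == '(':
--             break
--         last_char = char
--
--     for word in entry.split(' '):
--         if word in ['Single-Core', 'Single-core', 'Single', 'single']:
--             sum += 1
--         elif word in ['Dual-Core', 'Dual-core', 'Dual', 'dual']:
--             sum += 2
--         elif word in ['Triple-Core', 'Triple-core', 'Triple', 'triple']: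
--             sum += 3
--         elif word in ['Quad-Core', 'Quad-core', 'Quad', 'quad']:
--             sum += 4
--         elif word in ['Hexa-Core', 'Hexa-core', 'Hexa', 'hexa']:
--             sum += 6
--         elif word in ['Octa-Core', 'Octa-core', 'Octa', 'octa']:
--             sum += 8
--
--     return max(min(sum, 8), 1)
-- ===== SOURCE B (Python) =====
-- _CORES = {
--     'Single-Core': 1, 'Single-core': 1, 'Single': 1, 'single': 1,
--     'Dual-Core': 2, 'Dual-core': 2, 'Dual': 2, 'dual': 2,
--     'Triple-Core': 3, 'Triple-core': 3, 'Triple': 3, 'triple': 3,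
--     'Quad-Core': 4, 'Quad-core': 4, 'Quad': 4, 'quad': 4,
--     'Hexa-Core': 6, 'Hexa-core': 6, 'Hexa': 6, 'hexa': 6,
--     'Octa-Core': 8, 'Octa-core': 8, 'Octa': 8, 'octa': 8,
-- }
--
--
-- def number_of_cores(entry):
--     # one fused pass: tokenize words ourselves while simultaneously counting
--     # the digit-before-x pairs (only until the first '(').
--     total = 0
--     prev = ' '
--     word = ''
--     counting = True
--     for ch in entry:
--         if ch == ' ':
--             total += _CORES.get(word, 0)
--             word = ''
--         else:
--             if counting and ch in 'xX' and prev.isdigit():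
--                 total += int(prev)
--             if ch == '(':
--                 counting = False
--             word += ch
--         prev = ch
--     total += _CORES.get(word, 0)
--     return 1 if total < 1 else (8 if total > 8 else total)
-- ===== Notes on version B (the rewrite author's own statement) =====
-- stated objective: alternative
-- what changed: B fuses A's two staged passes (char scan with break, then a split-by-space pass through a six-way if/elif chain) into one character-level loop that tokenizes words itself while counting digit-before-x pairs under a boolean flag, looking each finished word up in a literal dict.
import Mathlib
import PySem

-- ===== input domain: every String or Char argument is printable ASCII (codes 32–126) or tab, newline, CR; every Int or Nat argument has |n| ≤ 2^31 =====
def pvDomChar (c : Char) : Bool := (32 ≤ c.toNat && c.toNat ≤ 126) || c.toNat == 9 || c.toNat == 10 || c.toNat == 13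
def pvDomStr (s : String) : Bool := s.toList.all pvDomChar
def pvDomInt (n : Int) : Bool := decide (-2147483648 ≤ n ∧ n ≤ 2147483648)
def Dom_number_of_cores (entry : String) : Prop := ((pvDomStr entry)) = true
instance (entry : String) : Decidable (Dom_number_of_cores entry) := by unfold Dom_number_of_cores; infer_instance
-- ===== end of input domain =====

-- B fuses A's two staged passes (char scan with break + split(' ') keyword if/elif chain)
-- into ONE character-level pass that tokenizes words itself (no split) while counting the
-- digit-before-x pairs under a 'counting' flag; objective: alternative decomposition.

-- ===== PORT A =====
-- the first for-loop of A: state = (last_char, sum), with 'break' on '('.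
-- int(last_char) is ported as last.toNat - 48, exact because it is guarded by isdigit
-- (ASCII digit on the stated domain).
def ncLoopA : List Char → Char → Int → Int
  | [], _, s => s
  | c :: rest, last, s =>
    let s' := if (c == 'x' || c == 'X') && PySem.Chars.isdigit last then s + ((last.toNat : Int) - 48) else s
    if c = '(' then s' else ncLoopA rest c s'

def number_of_cores (entry : String) : Int :=
  let s1 := ncLoopA entry.toList ' ' 0
  let s2 := ((PySem.Str.split? entry " ").getD []).foldl (fun s w =>
    if w ∈ ["Single-Core", "Single-core", "Single", "single"] then s + 1
    else if w ∈ ["Dual-Core", "Dual-core", "Dual", "dual"] then s + 2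
    else if w ∈ ["Triple-Core", "Triple-core", "Triple", "triple"] then s + 3
    else if w ∈ ["Quad-Core", "Quad-core", "Quad", "quad"] then s + 4
    else if w ∈ ["Hexa-Core", "Hexa-core", "Hexa", "hexa"] then s + 6
    else if w ∈ ["Octa-Core", "Octa-core", "Octa", "octa"] then s + 8
    else s) s1
  max (min s2 8) 1

-- ===== PORT B =====
-- the literal dict _CORES of Source B
def ncCores : PySem.Dict String Int := PySem.Dict.mk
  [("Single-Core", 1), ("Single-core", 1), ("Single", 1), ("single", 1),
   ("Dual-Core", 2), ("Dual-core", 2), ("Dual", 2), ("dual", 2),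
   ("Triple-Core", 3), ("Triple-core", 3), ("Triple", 3), ("triple", 3),
   ("Quad-Core", 4), ("Quad-core", 4), ("Quad", 4), ("quad", 4),
   ("Hexa-Core", 6), ("Hexa-core", 6), ("Hexa", 6), ("hexa", 6),
   ("Octa-Core", 8), ("Octa-core", 8), ("Octa", 8), ("octa", 8)]

-- _CORES.get(word, 0); the accumulated word (a Python str) is carried as List Char
def ncScore (w : List Char) : Int := ncCores.getD (String.ofList w) 0

-- Source B's single fused loop: state = (prev, word, counting, total);
-- int(prev) ported as prev.toNat - 48, exact under the isdigit guard.
def ncLoopB : List Char → Char → List Char → Bool → Int → Int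
  | [], _, word, _, t => t + ncScore word
  | c :: r, prev, word, cnt, t =>
    if c = ' ' then ncLoopB r c [] cnt (t + ncScore word)
    else
      let t' := if cnt && (c == 'x' || c == 'X') && PySem.Chars.isdigit prev then t + ((prev.toNat : Int) - 48) else t
      let cnt' := if c = '(' then false else cnt
      ncLoopB r c (word ++ [c]) cnt' t'

def number_of_cores_alt (entry : String) : Int :=
  let total := ncLoopB entry.toList ' ' [] true 0
  if total < 1 then 1 else if total > 8 then 8 else total

-- ===== PRECONDITION & SPEC =====
def Spec_number_of_cores (entry : String) (out : Int) : Prop := out = number_of_cores_alt entry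
instance (entry : String) (out : Int) : Decidable (Spec_number_of_cores entry out) := by unfold Spec_number_of_cores; infer_instance

-- ===== CLAIM (what is proved, stated in full; the proofs are below) =====
def Claim_equal_number_of_cores : Prop := ∀ (entry : String), Dom_number_of_cores entry → Spec_number_of_cores entry (number_of_cores entry)

-- ===== LEMMAS AND PROOFS =====

-- the word-score part of B's loop, as a standalone function for the invariant
def ncWSum : List Char → List Char → Int
  | word, [] => ncScore word
  | word, c :: r => if c = ' ' then ncScore word + ncWSum [] r else ncWSum (word ++ [c]) r

theorem ncLoopA_acc (l : List Char) : ∀ (p : Char) (s : Int),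
    ncLoopA l p s = s + ncLoopA l p 0 := by
  induction l with
  | nil => intro p s; simp [ncLoopA]
  | cons c rest ih =>
    intro p s
    simp only [ncLoopA]
    by_cases hx : ((c == 'x' || c == 'X') && PySem.Chars.isdigit p) = true
    · by_cases hp : c = '('
      · simp [hp]
      · simp only [hx, if_true, if_neg hp]
        rw [ih c (s + _), ih c (0 + _)]
        ring
    · by_cases hp : c = '('
      · simp [hp]
      · simp only [eq_false hx, if_false, if_neg hp]
        rw [ih c s]

-- B's fused loop = (digit-x part as A computes it, when counting) + the word-score part
theorem ncLoopB_eq (l : List Char) : ∀ (prev : Char) (word : List Char) (cnt : Bool) (t : Int),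
    ncLoopB l prev word cnt t =
      t + (if cnt then ncLoopA l prev 0 else 0) + ncWSum word l := by
  induction l with
  | nil => intro prev word cnt t; cases cnt <;> simp [ncLoopB, ncWSum, ncLoopA]
  | cons c r ih =>
    intro prev word cnt t
    by_cases hsp : c = ' '
    · subst hsp
      have hA : ncLoopA (' ' :: r) prev 0 = ncLoopA r ' ' 0 := by
        simp [ncLoopA, PySem.Chars.isdigit]
      simp only [ncLoopB, ih, ncWSum, hA]
      cases cnt <;> simp <;> ring
    · simp only [ncLoopB, if_neg hsp, ih]
      have hW : ncWSum word (c :: r) = ncWSum (word ++ [c]) r := by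
        simp [ncWSum, hsp]
      rw [hW]
      cases cnt
      · simp
      · by_cases hpar : c = '('
        · subst hpar
          simp [ncLoopA, PySem.Chars.isdigit]
        · have hA : ncLoopA (c :: r) prev 0 =
              (if (c == 'x' || c == 'X') && PySem.Chars.isdigit prev then ((prev.toNat : Int) - 48) else 0)
                + ncLoopA r c 0 := by
            simp only [ncLoopA, if_neg hpar]
            split_ifs with h
            · rw [ncLoopA_acc]; ring
            · simp
          rw [hA]
          split_ifs with h <;> simp_all <;> ring

-- the accumulator of Chars.splitOn.go factors out
theorem ncGo_acc (sep : List Char) : ∀ (fuel : Nat) (l cur : List Char) (acc : List (List Char)),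
    PySem.Chars.splitOn.go sep fuel l cur acc = acc.reverse ++ PySem.Chars.splitOn.go sep fuel l cur [] := by
  intro fuel
  induction fuel with
  | zero => intro l cur acc; simp [PySem.Chars.splitOn.go]
  | succ fuel ih =>
    intro l cur acc
    cases l with
    | nil => simp [PySem.Chars.splitOn.go]
    | cons c rest =>
      simp only [PySem.Chars.splitOn.go]
      split
      · rw [ih _ _ (cur.reverse :: acc), ih _ _ [cur.reverse]]
        simp
      · exact ih _ _ acc

-- folding word scores over splitOn-by-space = B's ncWSum
theorem ncFold_go : ∀ (fuel : Nat) (l cur : List Char) (s : Int), l.length < fuel →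
    (PySem.Chars.splitOn.go [' '] fuel l cur []).foldl (fun s w => s + ncScore w) s =
      s + ncWSum cur.reverse l := by
  intro fuel
  induction fuel with
  | zero => intro l cur s h; omega
  | succ fuel ih =>
    intro l cur s h
    cases l with
    | nil => simp [PySem.Chars.splitOn.go, ncWSum]
    | cons c rest =>
      by_cases hsp : c = ' '
      · subst hsp
        simp only [PySem.Chars.splitOn.go]
        rw [if_pos (by simp [List.isPrefixOf])]
        rw [ncGo_acc]
        simp only [List.length_cons, List.drop_succ_cons, List.length_nil, List.drop_zero] at *
        rw [List.foldl_append]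
        simp only [List.reverse_cons, List.reverse_nil, List.nil_append, List.foldl_cons, List.foldl_nil]
        rw [ih rest [] (s + ncScore cur.reverse) (by simp at h ⊢; omega)]
        simp [ncWSum]
        ring
      · simp only [PySem.Chars.splitOn.go]
        rw [if_neg (by simp [List.isPrefixOf]; exact fun h => hsp h.symm)]
        rw [ih rest (c :: cur) s (by simp at h ⊢; omega)]
        simp [ncWSum, hsp]

-- A's if/elif keyword chain computes exactly the dict lookup
set_option maxHeartbeats 1000000 in
theorem ncWord_eq (w : String) :
    (if w ∈ ["Single-Core", "Single-core", "Single", "single"] then (1 : Int)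
    else if w ∈ ["Dual-Core", "Dual-core", "Dual", "dual"] then 2
    else if w ∈ ["Triple-Core", "Triple-core", "Triple", "triple"] then 3
    else if w ∈ ["Quad-Core", "Quad-core", "Quad", "quad"] then 4
    else if w ∈ ["Hexa-Core", "Hexa-core", "Hexa", "hexa"] then 6
    else if w ∈ ["Octa-Core", "Octa-core", "Octa", "octa"] then 8
    else 0) = ncCores.getD w 0 := by
  by_cases h0 : w = "Single-Core"; · subst h0; decide
  by_cases h1 : w = "Single-core"; · subst h1; decide
  by_cases h2 : w = "Single"; · subst h2; decide
  by_cases h3 : w = "single"; · subst h3; decide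
  by_cases h4 : w = "Dual-Core"; · subst h4; decide
  by_cases h5 : w = "Dual-core"; · subst h5; decide
  by_cases h6 : w = "Dual"; · subst h6; decide
  by_cases h7 : w = "dual"; · subst h7; decide
  by_cases h8 : w = "Triple-Core"; · subst h8; decide
  by_cases h9 : w = "Triple-core"; · subst h9; decide
  by_cases h10 : w = "Triple"; · subst h10; decide
  by_cases h11 : w = "triple"; · subst h11; decide
  by_cases h12 : w = "Quad-Core"; · subst h12; decide
  by_cases h13 : w = "Quad-core"; · subst h13; decide
  by_cases h14 : w = "Quad"; · subst h14; decide
  by_cases h15 : w = "quad"; · subst h15; decide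
  by_cases h16 : w = "Hexa-Core"; · subst h16; decide
  by_cases h17 : w = "Hexa-core"; · subst h17; decide
  by_cases h18 : w = "Hexa"; · subst h18; decide
  by_cases h19 : w = "hexa"; · subst h19; decide
  by_cases h20 : w = "Octa-Core"; · subst h20; decide
  by_cases h21 : w = "Octa-core"; · subst h21; decide
  by_cases h22 : w = "Octa"; · subst h22; decide
  by_cases h23 : w = "octa"; · subst h23; decide
  simp [ncCores, PySem.Dict.getD, PySem.Dict.get?, beq_iff_eq, h0, h1, h2, h3, h4, h5, h6, h7, h8, h9, h10, h11, h12, h13, h14, h15, h16, h17, h18, h19, h20, h21, h22, h23, Ne.symm h0, Ne.symm h1, Ne.symm h2, Ne.symm h3, Ne.symm h4, Ne.symm h5, Ne.symm h6, Ne.symm h7, Ne.symm h8, Ne.symm h9, Ne.symm h10, Ne.symm h11, Ne.symm h12, Ne.symm h13, Ne.symm h14, Ne.symm h15, Ne.symm h16, Ne.symm h17, Ne.symm h18, Ne.symm h19, Ne.symm h20, Ne.symm h21, Ne.symm h22, Ne.symm h23]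

-- ===== VERDICT (by name: the statement is the Claim_ definition above) =====
theorem number_of_cores_spec : Claim_equal_number_of_cores := by
  intro entry _
  simp only [Spec_number_of_cores, number_of_cores, number_of_cores_alt]
  have hsplit : PySem.Str.split? entry " " =
      some ((PySem.Chars.splitOn entry.toList [' ']).map String.ofList) := by
    simp [PySem.Str.split?, PySem.Chars.split?]
  rw [hsplit]
  have hf : (fun (s : Int) (w : String) =>
      if w ∈ ["Single-Core", "Single-core", "Single", "single"] then s + 1
      else if w ∈ ["Dual-Core", "Dual-core", "Dual", "dual"] then s + 2
      else if w ∈ ["Triple-Core", "Triple-core", "Triple", "triple"] then s + 3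
      else if w ∈ ["Quad-Core", "Quad-core", "Quad", "quad"] then s + 4
      else if w ∈ ["Hexa-Core", "Hexa-core", "Hexa", "hexa"] then s + 6
      else if w ∈ ["Octa-Core", "Octa-core", "Octa", "octa"] then s + 8
      else s) = fun s w => s + ncCores.getD w 0 := by
    funext s w
    rw [← ncWord_eq]
    split_ifs <;> ring
  simp only [Option.getD_some, hf, List.foldl_map]
  have hsc : (fun (s : Int) (l : List Char) => s + ncCores.getD (String.ofList l) 0) =
      fun s l => s + ncScore l := rfl
  rw [hsc]
  have hfuel : entry.toList.length < entry.toList.length + 1 := by omega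
  rw [show PySem.Chars.splitOn entry.toList [' '] =
      PySem.Chars.splitOn.go [' '] (entry.toList.length + 1) entry.toList [] [] from rfl]
  rw [ncFold_go _ _ _ _ hfuel, ncLoopB_eq]
  simp only [List.reverse_nil, if_pos]
  omega
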